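-- pv_equiv track=rewrite | github.com/MeetKai/functionary | functionary/train/train_utils.py | extract_unmasked_chunks
-- ===== SOURCE A (Python) =====
-- from typing import Any, List, Dict
--
-- def extract_unmasked_chunks(labels: List[int], preds: List[int]):
--     """labels = [-100, -100, ... id1, id2, ...-100, -100, ...]
--     this function extract unmasked chunks: [[id1, id2, ...], ...] in both labels and preds
--
--     Args:
--         labels (List[int]): _description_
--         preds (List[int]): _description_
--
--     Returns:
--         _type_: _description_
--     """
--     current_label_chunk = []
--     current_pred_chunk = []
--     result = []
--     for i in range(len(labels)):
--         if labels[i] != -100: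
--             current_label_chunk.append(labels[i])
--             current_pred_chunk.append(preds[i])
--         else:
--             if len(current_label_chunk) > 0:  # end of the assistant response chunk
--                 result.append((current_label_chunk, current_pred_chunk))
--                 current_label_chunk = []
--                 current_pred_chunk = []
--
--     if len(current_label_chunk) > 0:
--         result.append((current_label_chunk, current_pred_chunk))
--     return result
-- ===== SOURCE B (Python) =====
-- def extract_unmasked_chunks(labels, preds):
--     """Two-pointer run scanner: find each maximal run of non -100 labels
--     and emit (label slice, pred elements) per run."""
--     result = []
--     n = len(labels)
--     i = 0
--     while i < n:
--         if labels[i] == -100: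
--             i += 1
--         else:
--             j = i
--             while j < n and labels[j] != -100:
--                 j += 1
--             result.append((labels[i:j], [preds[k] for k in range(i, j)]))
--             i = j
--     return result
-- ===== Notes on version B (the rewrite author's own statement) =====
-- stated objective: alternative
-- what changed: Replaced the element-by-element accumulator/flush loop with a two-pointer run scanner that finds each maximal unmasked run and emits one slice per run.
-- outside the precondition, e.g. on extract_unmasked_chunks([1, 2], [7]): A raises IndexError, B raises IndexError
import Mathlib
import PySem

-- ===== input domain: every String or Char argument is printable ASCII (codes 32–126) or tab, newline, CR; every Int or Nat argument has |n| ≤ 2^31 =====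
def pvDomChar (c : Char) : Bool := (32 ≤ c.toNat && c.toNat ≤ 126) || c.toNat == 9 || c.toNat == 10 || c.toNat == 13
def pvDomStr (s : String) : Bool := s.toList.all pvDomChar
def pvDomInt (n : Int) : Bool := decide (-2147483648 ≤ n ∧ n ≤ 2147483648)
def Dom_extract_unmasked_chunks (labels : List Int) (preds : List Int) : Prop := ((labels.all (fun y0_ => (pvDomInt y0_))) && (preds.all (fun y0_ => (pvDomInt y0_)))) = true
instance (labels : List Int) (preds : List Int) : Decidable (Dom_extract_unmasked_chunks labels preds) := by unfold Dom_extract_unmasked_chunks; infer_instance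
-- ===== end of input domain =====

-- B replaces A's accumulator/flush loop by a two-pointer run scanner (alternative decomposition, same O(n) cost).

-- ===== PORT A =====
def extract_unmasked_chunks (labels : List Int) (preds : List Int) : List (List Int × List Int) :=
  let st := (PySem.List.pyRange 0 (labels.length : Int) 1).foldl
    (fun (st : List Int × List Int × List (List Int × List Int)) i =>
      if PySem.List.pyGetD labels i 0 ≠ -100 then
        (st.1 ++ [PySem.List.pyGetD labels i 0], st.2.1 ++ [PySem.List.pyGetD preds i 0], st.2.2)
      else if st.1.length > 0 then ([], [], st.2.2 ++ [(st.1, st.2.1)])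
      else st)
    ([], [], [])
  if st.1.length > 0 then st.2.2 ++ [(st.1, st.2.1)] else st.2.2

-- ===== PORT B =====
-- inner 'while j < n and labels[j] != -100: j += 1' of Source B
def findRunEnd (labels : List Int) (j : Nat) : Nat :=
  if h : j < labels.length then
    if labels[j] ≠ -100 then findRunEnd labels (j + 1) else j
  else j
termination_by labels.length - j

-- cited by altLoop's decreasing_by
theorem le_findRunEnd (labels : List Int) (j : Nat) : j ≤ findRunEnd labels j := by
  unfold findRunEnd
  split
  · split
    · have := le_findRunEnd labels (j + 1); omega
    · omega
  · omega
termination_by labels.length - j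

theorem findRunEnd_step (labels : List Int) (j : Nat) (h : j < labels.length)
    (hm : labels[j] ≠ -100) : findRunEnd labels j = findRunEnd labels (j + 1) := by
  rw [findRunEnd]; simp [h, hm]

-- outer while loop of Source B, 'result' as accumulator
def altLoop (labels preds : List Int) (i : Nat) (res : List (List Int × List Int)) :
    List (List Int × List Int) :=
  if h : i < labels.length then
    if labels[i] = -100 then altLoop labels preds (i + 1) res
    else
      let j := findRunEnd labels i
      altLoop labels preds j
        (res ++ [(PySem.List.slice labels (some (i : Int)) (some (j : Int)),
                  (PySem.List.pyRange (i : Int) (j : Int) 1).map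
                    (fun k => PySem.List.pyGetD preds k 0))])
  else res
termination_by labels.length - i
decreasing_by
  · omega
  · have h1 := findRunEnd_step labels i h (by assumption)
    have h2 := le_findRunEnd labels (i + 1)
    omega

def extract_unmasked_chunks_alt (labels : List Int) (preds : List Int) :
    List (List Int × List Int) :=
  altLoop labels preds 0 []

-- ===== PRECONDITION & SPEC =====
-- Pre_ excludes exactly the inputs on which Python A raises IndexError: an unmasked
-- position i with i ≥ len(preds) (B raises there too).
def Pre_extract_unmasked_chunks (labels : List Int) (preds : List Int) : Prop :=
  ∀ i ∈ List.range labels.length, labels.getD i 0 ≠ -100 → i < preds.length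

instance (labels : List Int) (preds : List Int) :
    Decidable (Pre_extract_unmasked_chunks labels preds) := by
  unfold Pre_extract_unmasked_chunks; infer_instance

def pvWitness_extract_unmasked_chunks : List Int × List Int :=
  ([-100, 1, 2, -100, 3], [0, 5, 6, 0, 7])

def Spec_extract_unmasked_chunks (labels : List Int) (preds : List Int) (out : List (List Int × List Int)) : Prop := out = extract_unmasked_chunks_alt labels preds
instance (labels : List Int) (preds : List Int) (out : List (List Int × List Int)) : Decidable (Spec_extract_unmasked_chunks labels preds out) := by unfold Spec_extract_unmasked_chunks; infer_instance

-- ===== CLAIM (what is proved, stated in full; the proofs are below) =====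
def Claim_equal_extract_unmasked_chunks : Prop := ∀ (labels : List Int) (preds : List Int), Dom_extract_unmasked_chunks labels preds → Pre_extract_unmasked_chunks labels preds → Spec_extract_unmasked_chunks labels preds (extract_unmasked_chunks labels preds)

-- ===== LEMMAS AND PROOFS =====

-- A's loop body and final flush, as named helpers (definitional repackaging of port A)
def stepA (labels preds : List Int)
    (st : List Int × List Int × List (List Int × List Int)) (i : Int) :
    List Int × List Int × List (List Int × List Int) :=
  if PySem.List.pyGetD labels i 0 ≠ -100 then
    (st.1 ++ [PySem.List.pyGetD labels i 0], st.2.1 ++ [PySem.List.pyGetD preds i 0], st.2.2)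
  else if st.1.length > 0 then ([], [], st.2.2 ++ [(st.1, st.2.1)])
  else st

def finalizeA (st : List Int × List Int × List (List Int × List Int)) :
    List (List Int × List Int) :=
  if st.1.length > 0 then st.2.2 ++ [(st.1, st.2.1)] else st.2.2

-- A's fold written as an index recursion
def goA (labels preds : List Int) (i : Nat)
    (st : List Int × List Int × List (List Int × List Int)) : List (List Int × List Int) :=
  if i < labels.length then goA labels preds (i + 1) (stepA labels preds st (i : Int))
  else finalizeA st
termination_by labels.length - i

theorem extract_eq_goA (labels preds : List Int) :
    extract_unmasked_chunks labels preds = goA labels preds 0 (([], [], []) :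
      List Int × List Int × List (List Int × List Int)) := by
  have key : ∀ (k i : Nat), labels.length - i = k → i ≤ labels.length →
      ∀ st, finalizeA ((PySem.List.pyRange (i : Int) (labels.length : Int) 1).foldl
        (stepA labels preds) st) = goA labels preds i st := by
    intro k
    induction k with
    | zero =>
      intro i hk hle st
      have hi : i = labels.length := by omega
      subst hi
      rw [PySem.List.pyRange_one_eq_nil (by omega), goA]
      simp
    | succ k ih =>
      intro i hk hle st
      have hi : i < labels.length := by omega
      rw [PySem.List.pyRange_one_cons (by exact_mod_cast hi), List.foldl_cons, goA, if_pos hi]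
      have hcast : ((i : Int) + 1) = ((i + 1 : Nat) : Int) := by push_cast; ring
      rw [hcast]
      exact ih (i + 1) (by omega) (by omega) _
  have := key (labels.length) 0 (by omega) (by omega) ([], [], [])
  rw [← this]
  rfl

theorem altLoop_acc (labels preds : List Int) (i : Nat) (res : List (List Int × List Int)) :
    altLoop labels preds i res = res ++ altLoop labels preds i [] := by
  rw [altLoop]
  conv_rhs => rw [altLoop]
  by_cases h : i < labels.length
  · rw [dif_pos h, dif_pos h]
    by_cases hm : labels[i] = -100
    · rw [if_pos hm, if_pos hm]
      exact altLoop_acc labels preds (i + 1) res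
    · rw [if_neg hm, if_neg hm]
      rw [altLoop_acc labels preds (findRunEnd labels i) (res ++ _),
          altLoop_acc labels preds (findRunEnd labels i) ([] ++ _)]
      simp
  · rw [dif_neg h, dif_neg h]; simp
termination_by labels.length - i
decreasing_by
  · omega
  · have h1 := findRunEnd_step labels i h hm
    have h2 := le_findRunEnd labels (i + 1)
    omega
  · have h1 := findRunEnd_step labels i h hm
    have h2 := le_findRunEnd labels (i + 1)
    omega

-- what goA computes when the pending chunk is (cl, cp)
def glue (labels preds cl cp : List Int) (i : Nat) : List (List Int × List Int) :=
  if cl.length > 0 then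
    (cl ++ PySem.List.slice labels (some (i : Int)) (some ((findRunEnd labels i : Nat) : Int)),
     cp ++ (PySem.List.pyRange (i : Int) ((findRunEnd labels i : Nat) : Int) 1).map
       (fun k => PySem.List.pyGetD preds k 0)) :: altLoop labels preds (findRunEnd labels i) []
  else altLoop labels preds i []

theorem findRunEnd_stop (labels : List Int) (j : Nat)
    (h : ¬ j < labels.length ∨ labels.getD j 0 = -100) : findRunEnd labels j = j := by
  rw [findRunEnd]
  rcases h with h | h
  · simp [h]
  · split
    · rename_i hj
      rw [List.getD_eq_getElem labels 0 hj] at h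
      simp [h]
    · rfl

theorem slice_cons_run (xs : List Int) (i j : Nat) (h : i < xs.length) (hij : i < j) :
    PySem.List.slice xs (some (i : Int)) (some (j : Int)) =
      xs[i] :: PySem.List.slice xs (some ((i + 1 : Nat) : Int)) (some (j : Int)) := by
  rw [PySem.List.slice_natCast, PySem.List.slice_natCast]
  conv_lhs => rw [← List.getElem_cons_drop h]
  have hj : j - i = (j - (i + 1)) + 1 := by omega
  rw [hj, List.take_succ_cons]

theorem map_range_cons_run (preds : List Int) (i j : Nat) (hij : i < j) :
    (PySem.List.pyRange (i : Int) (j : Int) 1).map (fun k => PySem.List.pyGetD preds k 0) =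
      PySem.List.pyGetD preds (i : Int) 0 ::
        (PySem.List.pyRange ((i + 1 : Nat) : Int) (j : Int) 1).map
          (fun k => PySem.List.pyGetD preds k 0) := by
  rw [PySem.List.pyRange_one_cons (by exact_mod_cast hij)]
  have hcast : ((i : Int) + 1) = ((i + 1 : Nat) : Int) := by push_cast; ring
  rw [List.map_cons, hcast]

theorem goA_glue (labels preds : List Int) (i : Nat) (cl cp : List Int)
    (res : List (List Int × List Int)) (hcc : cl = [] → cp = []) :
    goA labels preds i (cl, cp, res) = res ++ glue labels preds cl cp i := by
  by_cases h : i < labels.length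
  · have hget : PySem.List.pyGetD labels (i : Int) 0 = labels[i] := by
      simp [PySem.List.pyGetD_natCast, List.getElem?_eq_getElem h]
    by_cases hm : labels[i] = -100
    · -- masked position: A flushes, B skips
      rw [goA, if_pos h]
      have hstep : stepA labels preds (cl, cp, res) (i : Int) =
          if cl.length > 0 then ([], [], res ++ [(cl, cp)]) else (cl, cp, res) := by
        unfold stepA; simp [hget, hm]
      have hstop : findRunEnd labels i = i :=
        findRunEnd_stop labels i (Or.inr (by rw [List.getD_eq_getElem labels 0 h]; exact hm))
      have haltski : altLoop labels preds i ([] : List (List Int × List Int)) =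
          altLoop labels preds (i + 1) [] := by
        rw [altLoop, dif_pos h, if_pos hm]
      by_cases hc : cl.length > 0
      · rw [hstep, if_pos hc, goA_glue labels preds (i + 1) [] [] (res ++ [(cl, cp)]) (fun _ => rfl)]
        unfold glue
        rw [if_neg (by simp), if_pos hc, hstop]
        rw [PySem.List.slice_natCast, PySem.List.pyRange_one_eq_nil (by omega)]
        simp [haltski]
      · rw [hstep, if_neg hc, goA_glue labels preds (i + 1) cl cp res hcc]
        unfold glue
        rw [if_neg hc, if_neg hc, haltski]
    · -- unmasked position: A extends the pending chunk, B is inside a run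
      rw [goA, if_pos h]
      have hstep : stepA labels preds (cl, cp, res) (i : Int) =
          (cl ++ [labels[i]], cp ++ [PySem.List.pyGetD preds (i : Int) 0], res) := by
        unfold stepA; simp [hget, hm]
      rw [hstep, goA_glue labels preds (i + 1) _ _ res (by intro hx; simp at hx)]
      have hrun : findRunEnd labels i = findRunEnd labels (i + 1) := findRunEnd_step labels i h hm
      have hlt : i < findRunEnd labels (i + 1) := by
        have := le_findRunEnd labels (i + 1); omega
      have hchunk :
          glue labels preds (cl ++ [labels[i]]) (cp ++ [PySem.List.pyGetD preds (i : Int) 0]) (i + 1) =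
          (cl ++ PySem.List.slice labels (some (i : Int))
              (some ((findRunEnd labels i : Nat) : Int)),
           cp ++ (PySem.List.pyRange (i : Int) ((findRunEnd labels i : Nat) : Int) 1).map
              (fun k => PySem.List.pyGetD preds k 0)) ::
            altLoop labels preds (findRunEnd labels i) [] := by
        unfold glue
        rw [if_pos (by simp), hrun,
            slice_cons_run labels i (findRunEnd labels (i + 1)) h hlt,
            map_range_cons_run preds i (findRunEnd labels (i + 1)) hlt]
        simp
      rw [hchunk]
      unfold glue
      by_cases hc : cl.length > 0
      · rw [if_pos hc]
      · rw [if_neg hc]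
        have hcl : cl = [] := by
          cases cl with
          | nil => rfl
          | cons a t => simp at hc
        have hcp := hcc hcl
        subst hcl; subst hcp
        conv_rhs => rw [altLoop]
        rw [dif_pos h, if_neg hm,
            altLoop_acc labels preds (findRunEnd labels i) ([] ++ _)]
        simp
  · -- i ≥ len: A's final flush
    rw [goA, if_neg h]
    have hstop : findRunEnd labels i = i := findRunEnd_stop labels i (Or.inl h)
    have halt : altLoop labels preds i ([] : List (List Int × List Int)) = [] := by
      rw [altLoop, dif_neg h]
    unfold finalizeA glue
    by_cases hc : cl.length > 0
    · rw [if_pos hc, if_pos hc, hstop, halt]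
      rw [PySem.List.slice_natCast, PySem.List.pyRange_one_eq_nil (by omega)]
      simp
    · rw [if_neg hc, if_neg hc, halt]
      simp
termination_by labels.length - i
decreasing_by all_goals omega

-- ===== VERDICT (by name: the statement is the Claim_ definition above) =====
theorem extract_unmasked_chunks_spec : Claim_equal_extract_unmasked_chunks := by
  intro labels preds _ _
  unfold Spec_extract_unmasked_chunks extract_unmasked_chunks_alt
  rw [extract_eq_goA, goA_glue labels preds 0 [] [] [] (fun _ => rfl)]
  unfold glue
  simp
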